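-- pv_equiv track=rewrite | github.com/mohadesesd/Rosalind-Solutions | finding_spliced_motif/spliced_motif.py | spliced_motif
-- ===== SOURCE A (Python) =====
-- def motif(sequence1, sequence2):
--     positions = []
--     for i in range(len(sequence1)-len(sequence2) + 1):
--         if(sequence1[i:i+len(sequence2)] == sequence2):
--             positions.append(i+1)
--     return positions
--
-- def spliced_motif(s, t):
--     indices = []
--     for i in t:
--         indx = motif(s, i)
--         if(indices):
--             for i in indx:
--                 if(i > indices[-1]):
--                     indices.append(i)
--                     break
--         else:
--             indices.append(indx[0])
--     return indices
-- ===== SOURCE B (Python) =====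
-- def spliced_motif(s, t):
--     res = []
--     p = 0
--     for c in t:
--         k = s.find(c, p)
--         if k >= 0:
--             res.append(k + 1)
--             p = k + 1
--     return res
-- ===== Notes on version B (the rewrite author's own statement) =====
-- stated objective: faster
-- what changed: Replaces the per-character full scan (motif builds the complete list of occurrences of each t-character over all of s, then a second loop picks the first one past the last index) by a single resuming pointer: str.find(c, p) starts each search where the previous match ended.
-- crash fix: When t is nonempty and its first character does not occur in s, A raises IndexError (indx[0] on an empty list); B simply skips that character, as A itself does for every later unmatched character, and returns the greedy matches of the rest. — e.g. on spliced_motif("AB", "CA"): A raises IndexError, B returns [1]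
import Mathlib
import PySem

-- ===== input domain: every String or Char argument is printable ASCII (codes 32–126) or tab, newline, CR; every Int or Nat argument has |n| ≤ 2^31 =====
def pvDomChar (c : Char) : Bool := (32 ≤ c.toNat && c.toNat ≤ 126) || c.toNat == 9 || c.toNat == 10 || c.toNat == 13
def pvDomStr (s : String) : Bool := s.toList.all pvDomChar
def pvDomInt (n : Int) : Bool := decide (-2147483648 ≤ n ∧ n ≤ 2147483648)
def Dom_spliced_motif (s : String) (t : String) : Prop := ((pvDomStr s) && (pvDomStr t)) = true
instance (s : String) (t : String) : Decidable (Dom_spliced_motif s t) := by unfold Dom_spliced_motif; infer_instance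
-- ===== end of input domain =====

-- B replaces A's per-character full scan of s (motif lists ALL occurrences, a second
-- loop picks the first one past the last index) by a single resuming pointer using
-- str.find(c, start): objective = faster (asymptotic on matching inputs).

-- ===== PORT A =====
-- helper motif(sequence1, sequence2): all 1-based start positions where sequence2 occurs in sequence1
def pvMotif (s1 : List Char) (s2 : List Char) : List Int :=
  (PySem.List.pyRange 0 ((s1.length : Int) - (s2.length : Int) + 1) 1).foldl
    (fun acc i =>
      if PySem.List.slice s1 (some i) (some (i + (s2.length : Int))) == s2 then acc ++ [i + 1]
      else acc) []

-- inner 'for i in indx: if i > indices[-1]: indices.append(i); break' = first element > bound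
def pvFirstGreater : List Int → Int → Option Int
  | [], _ => none
  | x :: xs, b => if b < x then some x else pvFirstGreater xs b

-- one iteration of A's outer loop over the characters of t
def pvStepA (sl : List Char) (indices : List Int) (c : Char) : List Int :=
  let indx := pvMotif sl [c]
  match indices with
  | [] =>
    -- indices.append(indx[0]); pyGet? = none is Python's IndexError, excluded by Pre_
    match PySem.List.pyGet? indx 0 with
    | some v => [v]
    | none => []
  | _ :: _ =>
    match pvFirstGreater indx (indices.getLastD 0) with
    | some v => indices ++ [v]
    | none => indices

def spliced_motif (s : String) (t : String) : List Int :=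
  t.toList.foldl (pvStepA s.toList) []

-- ===== PORT B =====
-- one iteration of B's loop: k = s.find(c, p); if k >= 0: append k+1, p = k+1
def pvStepB (sl : List Char) (st : List Int × Int) (c : Char) : List Int × Int :=
  let k := PySem.Chars.findFrom sl [c] st.2
  if 0 ≤ k then (st.1 ++ [k + 1], k + 1) else st

def spliced_motif_alt (s : String) (t : String) : List Int :=
  (t.toList.foldl (pvStepB s.toList) ([], 0)).1

-- ===== PRECONDITION & SPEC =====
-- Pre_ excludes exactly the inputs where A raises IndexError: t nonempty whose FIRST
-- character never occurs in s (then indx[0] is taken from an empty list).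
def Pre_spliced_motif (s : String) (t : String) : Prop :=
  ((t.toList.take 1).all (fun c => s.toList.contains c)) = true
instance (s : String) (t : String) : Decidable (Pre_spliced_motif s t) := by
  unfold Pre_spliced_motif; infer_instance

def pvWitness_spliced_motif : String × String := ("ACGTACGT", "GTA")

-- A raises IndexError when t is nonempty and t's first character is absent from s;
-- B skips that character (as A itself does for later unmatched characters) and returns
-- the greedy matches of the rest of t.
def Raises_spliced_motif (s : String) (t : String) : Prop :=
  (!(t.toList.take 1).isEmpty && (t.toList.take 1).all (fun c => !s.toList.contains c)) = true
instance (s : String) (t : String) : Decidable (Raises_spliced_motif s t) := by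
  unfold Raises_spliced_motif; infer_instance
def pvRaiseWitness_spliced_motif : String × String := ("AB", "CA")
def pvRaiseWitnessOut_spliced_motif : List Int := [1]

def Spec_spliced_motif (s : String) (t : String) (out : List Int) : Prop :=
  out = spliced_motif_alt s t
instance (s : String) (t : String) (out : List Int) : Decidable (Spec_spliced_motif s t out) := by
  unfold Spec_spliced_motif; infer_instance

-- ===== CLAIM (what is proved, stated in full; the proofs are below) =====
def Claim_equal_spliced_motif : Prop :=
  ∀ (s : String) (t : String), Dom_spliced_motif s t → Pre_spliced_motif s t →
    Spec_spliced_motif s t (spliced_motif s t)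

def Claim_raises_spliced_motif : Prop :=
  (∀ (s : String) (t : String), Dom_spliced_motif s t → Raises_spliced_motif s t →
      ¬ Pre_spliced_motif s t) ∧
  (Dom_spliced_motif (pvRaiseWitness_spliced_motif.1) (pvRaiseWitness_spliced_motif.2) ∧
   Raises_spliced_motif (pvRaiseWitness_spliced_motif.1) (pvRaiseWitness_spliced_motif.2) ∧
   spliced_motif_alt (pvRaiseWitness_spliced_motif.1) (pvRaiseWitness_spliced_motif.2) =
     pvRaiseWitnessOut_spliced_motif)

-- ===== LEMMAS AND PROOFS =====

-- first occurrence of character c in a list, 0-based (proof-side reference function)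
def pvFF : List Char → Char → Option Nat
  | [], _ => none
  | x :: xs, c => if x = c then some 0 else (pvFF xs c).map (· + 1)

lemma pvFF_eq_none_iff (ys : List Char) (c : Char) : pvFF ys c = none ↔ c ∉ ys := by
  induction ys with
  | nil => simp [pvFF]
  | cons x xs ih =>
    by_cases h : x = c
    · simp [pvFF, h]
    · simp only [pvFF, if_neg h, Option.map_eq_none_iff, ih, List.mem_cons]
      constructor
      · intro hn; exact fun hc => hc.elim (fun hcx => h hcx.symm) hn
      · intro hn; exact fun hc => hn (Or.inr hc)

lemma pvGo_single (c : Char) (ys : List Char) : ∀ (k : Nat),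
    PySem.Chars.find.go [c] ys k =
      (match pvFF ys c with | none => -1 | some j => (k : Int) + j) := by
  induction ys with
  | nil => intro k; simp [PySem.Chars.find.go, pvFF]
  | cons y t ih =>
    intro k
    by_cases h : y = c
    · simp [PySem.Chars.find.go, pvFF, List.isPrefixOf, h]
    · have hne : (c == y) = false := by simp [Ne.symm h]
      simp only [PySem.Chars.find.go, pvFF, List.isPrefixOf, hne, if_neg h, Bool.false_and,
        Bool.false_eq_true, if_false, ih (k+1)]
      cases pvFF t c with
      | none => simp
      | some j => simp; ring

lemma pvFindFrom_eq (sl : List Char) (c : Char) (p : Nat) :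
    PySem.Chars.findFrom sl [c] (p : Int) =
      (match pvFF (sl.drop p) c with | none => -1 | some j => (p : Int) + j) := by
  unfold PySem.Chars.findFrom
  simp only [PySem.Chars.find]
  by_cases hlt : (sl.length : Int) < (p : Int)
  · have hd : sl.drop p = [] := by
      apply List.drop_eq_nil_of_le; exact_mod_cast le_of_lt hlt
    simp [hlt, hd, pvFF, if_neg (by omega : ¬ (p:Int) < 0)]
  · have hnn : ¬ (p:Int) < 0 := by omega
    simp only [if_neg hnn, if_neg hlt]
    rw [Int.toNat_natCast, Int.toNat_natCast, List.take_length, pvGo_single]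
    cases hff : pvFF (sl.drop p) c with
    | none => simp
    | some j => simp

-- pvMotif over a single-character pattern, front decomposition
lemma pvMotif_form (sl : List Char) (c : Char) :
    pvMotif sl [c] =
      (((List.range sl.length).map (Nat.cast : Nat → Int)).filter
          (fun i => PySem.List.slice sl (some i) (some (i + 1)) == [c])).map (fun i => i + 1) := by
  unfold pvMotif
  rw [PySem.List.foldl_append_if, PySem.List.pyRange_one]
  have h1 : ((sl.length : Int) - ↑([c].length) + 1 - 0).toNat = sl.length := by simp
  rw [h1]
  simp only [List.nil_append, List.length_cons, List.length_nil, Nat.cast_one, zero_add]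

lemma pvMotif_cons (x : Char) (xs : List Char) (c : Char) :
    pvMotif (x :: xs) [c] =
      (if x = c then [(1 : Int)] else []) ++ (pvMotif xs [c]).map (· + 1) := by
  rw [pvMotif_form, pvMotif_form]
  rw [List.length_cons, List.range_succ_eq_map]
  rw [List.map_cons, List.map_map, List.filter_cons]
  have h0 : (PySem.List.slice (x :: xs) (some ((0:Nat) : Int)) (some (((0:Nat):Int) + 1)) == [c]) = (x == c) := by
    rw [show ((0:Nat):Int) + 1 = ((1:Nat):Int) by simp, PySem.List.slice_natCast]
    cases hxc : (x == c) <;> simp_all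
  have h0' : (PySem.List.slice (x :: xs) (some ((Nat.cast : Nat → Int) 0)) (some ((Nat.cast : Nat → Int) 0 + 1)) == [c]) = (x == c) := h0
  rw [h0']
  have hpred : ∀ k : Nat,
      (PySem.List.slice (x :: xs) (some ((Nat.cast : Nat → Int) (Nat.succ k))) (some ((Nat.cast : Nat → Int) (Nat.succ k) + 1)) == [c]) =
      (PySem.List.slice xs (some ((Nat.cast : Nat → Int) k)) (some ((Nat.cast : Nat → Int) k + 1)) == [c]) := by
    intro k
    rw [show ((Nat.succ k : Nat) : Int) + 1 = ((k + 2 : Nat) : Int) by push_cast; ring,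
        show ((k : Nat) : Int) + 1 = ((k + 1 : Nat) : Int) by push_cast; ring,
        PySem.List.slice_natCast, PySem.List.slice_natCast]
    simp [Nat.succ_eq_add_one, List.drop_succ_cons]
  rw [List.filter_map, List.filter_map, List.map_map, List.map_map]
  have hfeq : ((fun i : Int => PySem.List.slice (x :: xs) (some i) (some (i + 1)) == [c]) ∘ ((Nat.cast : Nat → Int) ∘ Nat.succ)) =
      ((fun i : Int => PySem.List.slice xs (some i) (some (i + 1)) == [c]) ∘ (Nat.cast : Nat → Int)) := by
    funext k; exact hpred k
  rw [hfeq]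
  by_cases hxc : x = c
  · have hbt : (x == c) = true := by simp [hxc]
    rw [hbt]
    simp [Function.comp_def, hxc]
  · have hbf : (x == c) = false := by simp [hxc]
    rw [hbf]
    simp only [Bool.false_eq_true, if_false, if_neg hxc, List.nil_append, List.map_map]
    apply List.map_congr_left; intro a _
    simp [Function.comp_def]

lemma pvMotif_nil (c : Char) : pvMotif [] [c] = [] := rfl

lemma pvMotif_pos (sl : List Char) (c : Char) : ∀ y ∈ pvMotif sl [c], 1 ≤ y := by
  induction sl with
  | nil => simp [pvMotif_nil]
  | cons x xs ih =>
    intro y hy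
    rw [pvMotif_cons] at hy
    rcases List.mem_append.1 hy with h | h
    · split at h <;> simp_all
    · obtain ⟨z, hz, rfl⟩ := List.mem_map.1 h
      have := ih z hz; omega

lemma pvFirstGreater_map_succ (l : List Int) (b : Int) :
    pvFirstGreater (l.map (· + 1)) (b + 1) = (pvFirstGreater l b).map (· + 1) := by
  induction l with
  | nil => simp [pvFirstGreater]
  | cons x xs ih =>
    by_cases h : b < x <;> simp [pvFirstGreater, h, ih]

lemma pvFirstGreater_all (l : List Int) (b : Int) (h : ∀ y ∈ l, b < y) :
    pvFirstGreater l b = l.head? := by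
  cases l with
  | nil => rfl
  | cons x xs => simp [pvFirstGreater, h x (by simp)]

lemma pvMotif_head (sl : List Char) (c : Char) :
    (pvMotif sl [c]).head? = (pvFF sl c).map (fun j => (j : Int) + 1) := by
  induction sl with
  | nil => simp [pvMotif_nil, pvFF]
  | cons x xs ih =>
    rw [pvMotif_cons]
    by_cases h : x = c
    · simp [pvFF, h]
    · cases hff : pvFF xs c with
      | none => simp [pvFF, h, List.head?_map, ih, hff]
      | some j => simp [pvFF, h, List.head?_map, ih, hff]

lemma pvA1 (c : Char) : ∀ (sl : List Char) (p : Nat),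
    pvFirstGreater (pvMotif sl [c]) (p : Int) =
      (pvFF (sl.drop p) c).map (fun j => ((p : Int) + j) + 1) := by
  intro sl
  induction sl with
  | nil => intro p; simp [pvMotif_nil, pvFirstGreater, pvFF]
  | cons x xs ih =>
    intro p
    rw [pvMotif_cons]
    cases p with
    | zero =>
      by_cases h : x = c
      · simp [h, pvFirstGreater, pvFF]
      · have hall : ∀ y ∈ (pvMotif xs [c]).map (· + 1), (0 : Int) < y := by
          intro y hy
          obtain ⟨z, hz, rfl⟩ := List.mem_map.1 hy
          have := pvMotif_pos xs c z hz; omega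
        simp only [if_neg h, List.nil_append]
        rw [Nat.cast_zero, pvFirstGreater_all _ _ hall, List.head?_map, pvMotif_head]
        simp [pvFF, h]
        cases pvFF xs c <;> simp
    | succ q =>
      have key : pvFirstGreater ((pvMotif xs [c]).map (· + 1)) ((q : Int) + 1) =
          ((pvFF (xs.drop q) c).map (fun j => ((q : Int) + j) + 1)).map (· + 1) := by
        rw [pvFirstGreater_map_succ, ih q]
      have hq1 : ((q + 1 : Nat) : Int) = (q : Int) + 1 := by push_cast; ring
      by_cases h : x = c
      · simp only [if_pos h, List.singleton_append, pvFirstGreater, hq1,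
          if_neg (by omega : ¬ ((q : Int) + 1 < 1))]
        rw [key]
        simp [List.drop_succ_cons]
        cases pvFF (xs.drop q) c <;> simp
        ring
      · simp only [if_neg h, List.nil_append, hq1]
        rw [key]
        simp [List.drop_succ_cons]
        cases pvFF (xs.drop q) c <;> simp
        ring

lemma pvGet0 {α : Type} (l : List α) : PySem.List.pyGet? l 0 = l.head? := by
  cases l <;> simp [PySem.List.pyGet?, PySem.List.pyIdx?]

lemma pvMain (sl : List Char) : ∀ (tl : List Char) (res : List Int) (p : Nat),
    (res = [] → p = 0) →
    (res ≠ [] → res.getLastD 0 = (p : Int)) →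
    (res = [] → ∀ c ∈ tl.take 1, c ∈ sl) →
    tl.foldl (pvStepA sl) res = (tl.foldl (pvStepB sl) (res, (p : Int))).1 := by
  intro tl
  induction tl with
  | nil => intro res p _ _ _; rfl
  | cons c tl' ih =>
    intro res p h1 h2 h3
    simp only [List.foldl_cons]
    cases res with
    | nil =>
      have hp0 : p = 0 := h1 rfl
      subst hp0
      have hc : c ∈ sl := h3 rfl c (by simp)
      have hff : ∃ j, pvFF sl c = some j := by
        cases hff : pvFF sl c with
        | none => exact absurd ((pvFF_eq_none_iff sl c).1 hff) (by simp [hc])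
        | some j => exact ⟨j, rfl⟩
      obtain ⟨j, hj⟩ := hff
      have hA : pvStepA sl [] c = [(j : Int) + 1] := by
        show (match PySem.List.pyGet? (pvMotif sl [c]) 0 with
              | some v => [v] | none => ([] : List Int)) = [(j : Int) + 1]
        rw [pvGet0, pvMotif_head, hj]
        rfl
      have hB : pvStepB sl ([], ((0 : Nat) : Int)) c = ([(j : Int) + 1], (j : Int) + 1) := by
        unfold pvStepB
        rw [show ((0 : Nat) : Int) = ((0 : Nat) : Int) from rfl, pvFindFrom_eq]
        rw [List.drop_zero, hj]
        simp
      rw [hA, hB]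
      have := ih [(j : Int) + 1] (j + 1) (by simp)
        (by intro _
            show ((j : Int) + 1) = ((j + 1 : Nat) : Int)
            push_cast; ring)
        (by intro h; simp at h)
      simpa using this
    | cons r rs =>
      have hlast : (r :: rs).getLastD 0 = (p : Int) := h2 (by simp)
      have hA0 : pvStepA sl (r :: rs) c =
          (match pvFirstGreater (pvMotif sl [c]) ((p : Int)) with
           | some v => (r :: rs) ++ [v]
           | none => r :: rs) := by
        unfold pvStepA
        rw [hlast]
      cases hff : pvFF (sl.drop p) c with
      | none =>
        have hA : pvStepA sl (r :: rs) c = r :: rs := by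
          rw [hA0, pvA1, hff]
          try rfl
          try simp
        have hB : pvStepB sl (r :: rs, (p : Int)) c = (r :: rs, (p : Int)) := by
          unfold pvStepB
          rw [pvFindFrom_eq, hff]
          simp
        rw [hA, hB]
        exact ih (r :: rs) p h1 h2 (by intro h; simp at h)
      | some j =>
        have hA : pvStepA sl (r :: rs) c = (r :: rs) ++ [((p : Int) + j) + 1] := by
          rw [hA0, pvA1, hff]
          try rfl
          try simp
        have hB : pvStepB sl (r :: rs, (p : Int)) c =
            ((r :: rs) ++ [((p : Int) + j) + 1], ((p : Int) + j) + 1) := by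
          unfold pvStepB
          rw [pvFindFrom_eq, hff]
          simp only [if_pos (by omega : (0 : Int) ≤ (p : Int) + (j : Int))]
        rw [hA, hB]
        have := ih ((r :: rs) ++ [((p : Int) + j) + 1]) (p + j + 1)
          (by simp) (by intro _; rw [List.getLastD_concat]; push_cast; ring)
          (by intro h; simp at h)
        simpa using this

-- ===== VERDICT (by name: the statement is the Claim_ definition above) =====
theorem spliced_motif_spec : Claim_equal_spliced_motif := by
  intro s t _ hpre
  unfold Spec_spliced_motif spliced_motif spliced_motif_alt
  have hpre' : ∀ c ∈ t.toList.take 1, c ∈ s.toList := by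
    simpa [Pre_spliced_motif] using hpre
  exact pvMain s.toList t.toList [] 0 (fun _ => rfl) (fun h => absurd rfl h)
    (fun _ => hpre')

set_option maxRecDepth 4000 in
@[simp] theorem spliced_motif_raises : Claim_raises_spliced_motif := by
  unfold Claim_raises_spliced_motif
  constructor
  · intro s t _ hr hpre
    have hr' : t.toList.take 1 ≠ [] ∧ ∀ c ∈ t.toList.take 1, c ∉ s.toList := by
      simpa [Raises_spliced_motif] using hr
    have hpre' : ∀ c ∈ t.toList.take 1, c ∈ s.toList := by
      simpa [Pre_spliced_motif] using hpre
    obtain ⟨c, hc⟩ := List.exists_mem_of_ne_nil _ hr'.1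
    exact hr'.2 c hc (hpre' c hc)
  · exact ⟨by decide, by decide, rfl⟩
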